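-- pv_equiv track=rewrite | github.com/JimHeukels/OP2_2019-2020 | CH5/BA10.py | lineHoles
-- ===== SOURCE A (Python) =====
-- def lineHoles(i, n, sym, times):
--   if i == n:
--     return ''
--   else:
--     rest = lineHoles(i+1, n, sym, times)
--     if i % multipleOf == 0:
--       rest = str(i) + rest
--       return rest
--     else:
--       rest = str(sym) + rest
--       return rest
--
-- multipleOf = 3
-- ===== SOURCE B (Python) =====
-- multipleOf = 3
--
-- def lineHoles(i, n, sym, times):
--   # Iterative one-pass join instead of recursion-with-prepend.
--   return ''.join(str(j) if j % multipleOf == 0 else str(sym) for j in range(i, n))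
-- ===== Notes on version B (the rewrite author's own statement) =====
-- stated objective: simpler
-- what changed: Replaces the recursion that prepends during unwinding with a single forward iteration over range(i, n) joined into one string.
import Mathlib
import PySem

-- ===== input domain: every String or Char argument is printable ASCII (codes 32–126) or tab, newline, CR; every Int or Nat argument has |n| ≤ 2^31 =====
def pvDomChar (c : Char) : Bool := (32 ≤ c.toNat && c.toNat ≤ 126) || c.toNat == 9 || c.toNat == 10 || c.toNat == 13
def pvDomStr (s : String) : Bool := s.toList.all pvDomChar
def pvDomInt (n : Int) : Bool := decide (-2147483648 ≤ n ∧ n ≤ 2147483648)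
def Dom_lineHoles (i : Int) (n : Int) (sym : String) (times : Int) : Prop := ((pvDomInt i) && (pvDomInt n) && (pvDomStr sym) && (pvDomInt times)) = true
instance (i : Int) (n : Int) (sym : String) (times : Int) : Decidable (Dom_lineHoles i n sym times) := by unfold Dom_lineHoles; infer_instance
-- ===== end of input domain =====

-- B is the same characters built by one forward iteration joined into a string,
-- instead of A's recursion that prepends while unwinding (objective: simpler).

-- ===== PORT A =====
-- A recurses on i until i == n; for i ≤ n the recursion depth is exactly (n - i),
-- so the fuel (n - i).toNat makes the transliteration total (inputs with i > n,
-- where Python A raises RecursionError, are excluded by Pre_lineHoles).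
def lineHolesGo (fuel : Nat) (i : Int) (n : Int) (sym : String) : String :=
  match fuel with
  | 0 => ""
  | k + 1 =>
    if i = n then ""
    else
      let rest := lineHolesGo k (i + 1) n sym
      if PySem.Int.mod i 3 = 0 then PySem.Int.toStr i ++ rest
      else sym ++ rest

def lineHoles (i : Int) (n : Int) (sym : String) (times : Int) : String :=
  lineHolesGo ((n - i).toNat) i n sym

-- ===== PORT B =====
def lineHoles_alt (i : Int) (n : Int) (sym : String) (times : Int) : String :=
  String.join ((PySem.List.pyRange i n 1).map
    (fun j => if PySem.Int.mod j 3 = 0 then PySem.Int.toStr j else sym))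

-- ===== PRECONDITION & SPEC =====
-- Pre_ excludes i > n, where Python A never reaches its base case and raises RecursionError.
def Pre_lineHoles (i : Int) (n : Int) (sym : String) (times : Int) : Prop := i ≤ n
instance (i : Int) (n : Int) (sym : String) (times : Int) : Decidable (Pre_lineHoles i n sym times) := by unfold Pre_lineHoles; infer_instance
def pvWitness_lineHoles : Int × Int × String × Int := (-4, 5, "*", 0)

def Spec_lineHoles (i : Int) (n : Int) (sym : String) (times : Int) (out : String) : Prop := out = lineHoles_alt i n sym times
instance (i : Int) (n : Int) (sym : String) (times : Int) (out : String) : Decidable (Spec_lineHoles i n sym times out) := by unfold Spec_lineHoles; infer_instance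

-- ===== CLAIM =====
def Claim_equal_lineHoles : Prop := ∀ (i : Int) (n : Int) (sym : String) (times : Int), Dom_lineHoles i n sym times → Pre_lineHoles i n sym times → Spec_lineHoles i n sym times (lineHoles i n sym times)

-- ===== LEMMAS AND PROOFS =====
theorem pvFoldlApp (l : List String) : ∀ a : String, l.foldl (· ++ ·) a = a ++ l.foldl (· ++ ·) "" := by
  induction l with
  | nil => intro a; simp
  | cons x l ih => intro a; simp only [List.foldl]; rw [ih (a ++ x), ih ("" ++ x)]; simp [String.append_assoc]

theorem pvJoinCons (x : String) (l : List String) : String.join (x :: l) = x ++ String.join l := by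
  simp only [String.join, List.foldl]; rw [pvFoldlApp l ("" ++ x)]; simp

theorem lineHolesGo_eq_join (k : Nat) : ∀ (i n : Int) (sym : String),
    i ≤ n → (n - i).toNat = k →
    lineHolesGo k i n sym =
      String.join ((PySem.List.pyRange i n 1).map
        (fun j => if PySem.Int.mod j 3 = 0 then PySem.Int.toStr j else sym)) := by
  induction k with
  | zero =>
    intro i n sym hle hk
    have hni : n = i := by omega
    subst hni
    simp [lineHolesGo, PySem.List.pyRange_one_eq_nil (le_refl n), String.join]
  | succ k ih =>
    intro i n sym hle hk
    have hlt : i < n := by omega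
    have hne : i ≠ n := by omega
    rw [PySem.List.pyRange_one_cons hlt, List.map_cons, pvJoinCons]
    rw [show lineHolesGo (k+1) i n sym =
      (if i = n then "" else
        if PySem.Int.mod i 3 = 0 then PySem.Int.toStr i ++ lineHolesGo k (i + 1) n sym
        else sym ++ lineHolesGo k (i + 1) n sym) from rfl]
    rw [if_neg hne, ih (i + 1) n sym (by omega) (by omega)]
    split_ifs <;> rfl

-- ===== VERDICT =====
theorem lineHoles_spec : Claim_equal_lineHoles := by
  intro i n sym times _ hpre
  unfold Spec_lineHoles lineHoles lineHoles_alt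
  exact lineHolesGo_eq_join _ i n sym hpre rfl
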